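-- pv_equiv track=rewrite | github.com/daohanlu/mc-multiplayer-eval | run_all_evals.py | extract_eval_type
-- ===== SOURCE A (Python) =====
-- EVAL_TYPE_MAPPING = {
--     "translation": "translationEval",
--     "rotation": "rotationEval",
--     "structure": "structureEval",
--     "structure_no_place": "structureNoPlaceEval",
--     "turn_to_look": "turnToLookEval",
--     "turn_to_look_opposite": "turnToLookOppositeEval",
--     "one_looks_away": "oneLooksAwayEval",
--     "both_look_away": "bothLookAwayEval",
-- }
--
-- def extract_eval_type(folder_name: str) -> str | None:
--     """Extract evaluation type from generated folder name.
--
--     Examples: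
--         step_0080000_multiplayer_v2_eval_translation_ema_length_256 -> translation
--         step_0002000_multiplayer_v2_eval_both_look_away -> both_look_away
--         step_0001200_multiplayer_v2_eval_both_look_away_max_speed -> both_look_away
--     """
--     # Extract whatever comes after "eval_" and map it back to a canonical eval type key.
--     #
--     # We intentionally allow extra suffixes (e.g. "_ema_length_256", "_max_speed") and
--     # match by prefix against known keys in EVAL_TYPE_MAPPING.
--     _, _, suffix = folder_name.partition("eval_")
--     if not suffix:
--         return None
--
--     for key in sorted(EVAL_TYPE_MAPPING.keys(), key=len, reverse=True):
--         if suffix == key or suffix.startswith(f"{key}_"):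
--             return key
--
--     return None
-- ===== SOURCE B (Python) =====
-- EVAL_TYPE_MAPPING = {
--     "translation": "translationEval",
--     "rotation": "rotationEval",
--     "structure": "structureEval",
--     "structure_no_place": "structureNoPlaceEval",
--     "turn_to_look": "turnToLookEval",
--     "turn_to_look_opposite": "turnToLookOppositeEval",
--     "one_looks_away": "oneLooksAwayEval",
--     "both_look_away": "bothLookAwayEval",
-- }
--
-- def extract_eval_type(folder_name: str) -> str | None:
--     """Extract evaluation type from generated folder name.
--
--     Instead of scanning the mapping's keys, trim the suffix right-to-left at
--     underscore boundaries and look each prefix up in the mapping; the longest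
--     matching key is found first.
--     """
--     _, _, suffix = folder_name.partition("eval_")
--     if not suffix:
--         return None
--     s = suffix
--     while s:
--         if s in EVAL_TYPE_MAPPING:
--             return s
--         s = s.rpartition("_")[0]
--     return None
-- ===== Notes on version B (the rewrite author's own statement) =====
-- stated objective: simpler
-- what changed: Instead of scanning the mapping's keys sorted by length with startswith, B trims the extracted suffix right-to-left at underscore boundaries via rpartition and looks each prefix up in the mapping, so the longest matching key is found first.
import Mathlib
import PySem

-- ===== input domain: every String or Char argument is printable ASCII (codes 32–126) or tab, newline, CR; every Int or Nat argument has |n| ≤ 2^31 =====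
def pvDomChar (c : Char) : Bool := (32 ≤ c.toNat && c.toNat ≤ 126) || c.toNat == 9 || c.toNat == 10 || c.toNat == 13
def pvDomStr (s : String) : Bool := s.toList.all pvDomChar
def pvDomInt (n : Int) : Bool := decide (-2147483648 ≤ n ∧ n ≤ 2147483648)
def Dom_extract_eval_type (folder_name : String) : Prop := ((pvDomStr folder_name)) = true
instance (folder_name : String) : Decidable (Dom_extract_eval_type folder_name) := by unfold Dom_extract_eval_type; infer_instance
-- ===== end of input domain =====

-- B replaces A's startswith-scan over the mapping's length-sorted keys by trimming the suffix
-- right-to-left at underscore boundaries and looking each prefix up in the mapping (simpler).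

-- ===== PORT A =====

def evalTypeMapping : PySem.Dict String String := PySem.Dict.ofList
  [("translation", "translationEval"),
   ("rotation", "rotationEval"),
   ("structure", "structureEval"),
   ("structure_no_place", "structureNoPlaceEval"),
   ("turn_to_look", "turnToLookEval"),
   ("turn_to_look_opposite", "turnToLookOppositeEval"),
   ("one_looks_away", "oneLooksAwayEval"),
   ("both_look_away", "bothLookAwayEval")]

-- the for-loop over the sorted keys: first key with suffix == key or suffix.startswith(key + "_")
def aScan : List String → List Char → Option String
  | [], _ => none
  | k :: ks, s =>
    if decide (s = k.toList) || PySem.Chars.startswith s (k.toList ++ ['_']) then some k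
    else aScan ks s

-- folder_name.partition("eval_")[2], ported by hand via Chars.find (exact: '' when the
-- separator is absent, otherwise everything after its first occurrence)
def partitionAfterEval (cs : List Char) : List Char :=
  let i := PySem.Chars.find cs "eval_".toList
  if i = -1 then [] else cs.drop (i.toNat + 5)

def extract_eval_type (folder_name : String) : Option String :=
  let suffix := partitionAfterEval folder_name.toList
  if suffix = [] then none
  else aScan (PySem.List.sorted evalTypeMapping.keys (fun k => PySem.Str.len k) true) suffix

-- ===== PORT B =====

-- s.rpartition("_")[0], ported by hand (exact: everything before the LAST '_', '' if none)
def rpartBefore : List Char → List Char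
  | [] => []
  | c :: rest => if '_' ∈ rest then c :: rpartBefore rest else []

theorem rpartBefore_length_lt (s : List Char) (h : s ≠ []) : (rpartBefore s).length < s.length := by
  induction s with
  | nil => exact absurd rfl h
  | cons c rest ih =>
    simp only [rpartBefore]
    split
    · next hm =>
      have : rest ≠ [] := by rintro rfl; simp at hm
      simpa using ih this
    · simp

-- the while loop: check the current prefix, then trim at the last underscore
def bLoop (s : List Char) : Option String :=
  if h : s = [] then none
  else if evalTypeMapping.contains (String.ofList s) then some (String.ofList s)
  else bLoop (rpartBefore s)
termination_by s.length
decreasing_by exact rpartBefore_length_lt s h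

def extract_eval_type_alt (folder_name : String) : Option String :=
  let suffix := partitionAfterEval folder_name.toList
  if suffix = [] then none
  else bLoop suffix

-- ===== PRECONDITION & SPEC =====
def Spec_extract_eval_type (folder_name : String) (out : Option String) : Prop := out = extract_eval_type_alt folder_name
instance (folder_name : String) (out : Option String) : Decidable (Spec_extract_eval_type folder_name out) := by unfold Spec_extract_eval_type; infer_instance

-- ===== CLAIM (what is proved, stated in full; the proofs are below) =====
def Claim_equal_extract_eval_type : Prop := ∀ (folder_name : String), Dom_extract_eval_type folder_name → Spec_extract_eval_type folder_name (extract_eval_type folder_name)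

-- ===== LEMMAS AND PROOFS =====

def sortedKeysLit : List String :=
  ["turn_to_look_opposite", "structure_no_place", "one_looks_away", "both_look_away",
   "turn_to_look", "translation", "structure", "rotation"]

theorem sorted_keys_eq :
    PySem.List.sorted evalTypeMapping.keys (fun k => PySem.Str.len k) true = sortedKeysLit := by
  decide

def matchB (k : String) (s : List Char) : Bool :=
  decide (s = k.toList) || PySem.Chars.startswith s (k.toList ++ ['_'])

theorem aScan_congr (ks : List String) (s s' : List Char)
    (h : ∀ k ∈ ks, matchB k s = matchB k s') : aScan ks s = aScan ks s' := by
  induction ks with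
  | nil => rfl
  | cons k ks ih =>
    have hk := h k (by simp)
    simp only [aScan, matchB] at hk ⊢
    rw [hk]
    split
    · rfl
    · exact ih (fun k hk => h k (by simp [hk]))

theorem rp_nil_of_not_mem (s : List Char) (h : '_' ∉ s) : rpartBefore s = [] := by
  cases s with
  | nil => rfl
  | cons c rest =>
    simp only [rpartBefore]
    rw [if_neg (fun hm => h (by simp [hm]))]

theorem not_prefix_of_not_mem (s t : List Char) (h : '_' ∉ s) : ¬ (t ++ ['_'] <+: s) := by
  intro hp
  exact h (hp.subset (by simp))

theorem prefix_rp_iff (s : List Char) (h : '_' ∈ s) (t : List Char) :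
    (t ++ ['_'] <+: s) ↔ (t = rpartBefore s ∨ t ++ ['_'] <+: rpartBefore s) := by
  induction s generalizing t with
  | nil => simp at h
  | cons c rest ih =>
    by_cases hm : '_' ∈ rest
    · have hrp : rpartBefore (c :: rest) = c :: rpartBefore rest := by
        simp [rpartBefore, hm]
      rw [hrp]
      cases t with
      | nil =>
        simp only [List.nil_append]
        constructor
        · intro hp
          rcases List.cons_prefix_cons.mp hp with ⟨hc, _⟩
          right; exact List.cons_prefix_cons.mpr ⟨hc, List.nil_prefix⟩
        · rintro (h1 | h2)
          · exact absurd h1 (by simp)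
          · rcases List.cons_prefix_cons.mp h2 with ⟨hc, _⟩
            exact List.cons_prefix_cons.mpr ⟨hc, List.nil_prefix⟩
      | cons c' t' =>
        constructor
        · intro hp
          rcases List.cons_prefix_cons.mp hp with ⟨hc, hp'⟩
          subst hc
          rcases (ih hm t').mp hp' with h1 | h2
          · left; rw [h1]
          · right; exact List.cons_prefix_cons.mpr ⟨rfl, h2⟩
        · rintro (h1 | h2)
          · rcases List.cons_eq_cons.mp h1 with ⟨hc, ht⟩
            subst hc
            exact List.cons_prefix_cons.mpr ⟨rfl, (ih hm t').mpr (Or.inl ht)⟩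
          · rcases List.cons_prefix_cons.mp h2 with ⟨hc, hp'⟩
            subst hc
            exact List.cons_prefix_cons.mpr ⟨rfl, (ih hm t').mpr (Or.inr hp')⟩
    · have hc : c = '_' := by
        rcases List.mem_cons.mp h with h1 | h2
        · exact h1.symm
        · exact absurd h2 hm
      subst hc
      have hrp : rpartBefore ('_' :: rest) = [] := by simp [rpartBefore, hm]
      rw [hrp]
      cases t with
      | nil => simp [List.cons_prefix_cons]
      | cons c' t' =>
        constructor
        · intro hp
          rcases List.cons_prefix_cons.mp hp with ⟨_, hp'⟩
          exact absurd hp' (not_prefix_of_not_mem rest t' hm)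
        · rintro (h1 | h2) <;> simp_all

theorem matchB_step (k : String) (s : List Char) (hne : s ≠ k.toList)
    (hnil : k.toList ≠ []) : matchB k s = matchB k (rpartBefore s) := by
  by_cases hm : '_' ∈ s
  · rw [Bool.eq_iff_iff]
    simp only [matchB, Bool.or_eq_true, decide_eq_true_eq, PySem.Chars.startswith_iff]
    rw [prefix_rp_iff s hm k.toList]
    constructor
    · rintro (h1 | h2)
      · exact absurd h1 hne
      · rcases h2 with h2 | h2
        · left; exact h2.symm
        · right; exact h2
    · rintro (h1 | h2)
      · right; left; exact h1.symm
      · right; right; exact h2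
  · have hpre : PySem.Chars.startswith s (k.toList ++ ['_']) = false := by
      rw [Bool.eq_false_iff]
      intro h
      exact not_prefix_of_not_mem s k.toList hm ((PySem.Chars.startswith_iff s _).mp h)
    have hpre2 : PySem.Chars.startswith [] (k.toList ++ ['_']) = false := by
      rw [Bool.eq_false_iff]
      intro h
      have := (PySem.Chars.startswith_iff [] _).mp h
      simp at this
    have hnil' : ([] : List Char) ≠ k.toList := fun h => hnil h.symm
    rw [rp_nil_of_not_mem s hm]
    simp [matchB, hne, hpre, hpre2, hnil']

theorem evalTypeMapping_eq : evalTypeMapping = PySem.Dict.mk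
    [("translation", "translationEval"),
     ("rotation", "rotationEval"),
     ("structure", "structureEval"),
     ("structure_no_place", "structureNoPlaceEval"),
     ("turn_to_look", "turnToLookEval"),
     ("turn_to_look_opposite", "turnToLookOppositeEval"),
     ("one_looks_away", "oneLooksAwayEval"),
     ("both_look_away", "bothLookAwayEval")] := by
  decide

theorem contains_iff (x : String) :
    evalTypeMapping.contains x = true ↔ x ∈ sortedKeysLit := by
  rw [evalTypeMapping_eq]
  simp [sortedKeysLit]
  tauto

theorem aScan_keys : ∀ x ∈ sortedKeysLit, aScan sortedKeysLit x.toList = some x := by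
  decide

theorem contains_keys : ∀ k ∈ sortedKeysLit, evalTypeMapping.contains (String.ofList k.toList) = true := by
  decide

theorem main_loop (s : List Char) : bLoop s = aScan sortedKeysLit s := by
  induction s using bLoop.induct with
  | case1 => simp [bLoop]; decide
  | case2 s hne hcon =>
    rw [bLoop]
    rw [dif_neg hne, if_pos hcon]
    have hmem := (contains_iff (String.ofList s)).mp hcon
    have hs : (String.ofList s).toList = s := by simp
    conv_rhs => rw [← hs]
    exact (aScan_keys _ hmem).symm
  | case3 s hne hcon ih =>
    rw [bLoop]
    rw [dif_neg hne, if_neg (by simp [hcon]), ih]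
    apply aScan_congr
    intro k hk
    have hnek : s ≠ k.toList := by
      intro heq
      apply hcon
      rw [heq]
      exact contains_keys k hk
    refine (matchB_step k s hnek ?_).symm
    fin_cases hk <;> decide

-- ===== VERDICT (by name: the statement is the Claim_ definition above) =====
theorem extract_eval_type_spec : Claim_equal_extract_eval_type := by
  intro folder_name _
  unfold Spec_extract_eval_type extract_eval_type extract_eval_type_alt
  simp only [sorted_keys_eq]
  split
  · rfl
  · exact (main_loop _).symm
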